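-- pv_equiv track=rewrite | github.com/AnshulPatil2005/soul-protocol | src/soul_protocol/engine/journal/scope.py | scope_matches
-- ===== SOURCE A (Python) =====
-- def scope_matches(event_scopes: list[str], query_scopes: list[str]) -> bool:
--     """Return True iff any event scope matches any query pattern.
--
--     Semantics are asymmetric on purpose: `event_scopes` are concrete scopes
--     carried by a journal event, `query_scopes` are patterns supplied by a
--     caller looking for matches. Wildcards are valid on the pattern side;
--     putting a wildcard in an event scope works but means "this event was
--     emitted across a wildcard scope" which few writers do.
--     """
--     for pat in query_scopes:
--         pat_parts = pat.split(":")
--         for scope in event_scopes: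
--             scope_parts = scope.split(":")
--             if len(pat_parts) != len(scope_parts):
--                 continue
--             if all(p == "*" or p == s for p, s in zip(pat_parts, scope_parts)):
--                 return True
--     return False
-- ===== SOURCE B (Python) =====
-- def scope_matches(event_scopes: list[str], query_scopes: list[str]) -> bool:
--     """Segment-streaming rewrite: no splitting at all.  Each pattern/scope
--     pair is matched by a single synchronized walk over the two raw strings,
--     consuming one ':'-delimited segment at a time (a '*' pattern segment
--     skips the scope's current segment; otherwise the characters are compared
--     in lockstep).  The equal-part-count requirement falls out of the walk
--     having to reach both string ends simultaneously."""
--     return any(_match(pat, scope)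
--                for pat in query_scopes for scope in event_scopes)
--
--
-- def _match(pat: str, scope: str) -> bool:
--     while True:
--         if pat[:1] == '*' and (len(pat) == 1 or pat[1] == ':'):
--             pat, scope = pat[1:], _drop_seg(scope)
--         else:
--             pat, scope = _eat_common(pat, scope)
--         if pat == '' and scope == '':
--             return True
--         if pat[:1] == ':' and scope[:1] == ':':
--             pat, scope = pat[1:], scope[1:]
--             continue
--         return False
--
--
-- def _drop_seg(s: str) -> str:
--     while s and s[0] != ':':
--         s = s[1:]
--     return s
--
--
-- def _eat_common(p: str, s: str) -> "tuple[str, str]":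
--     while p and s and p[0] != ':' and s[0] != ':' and p[0] == s[0]:
--         p, s = p[1:], s[1:]
--     return p, s
-- ===== Notes on version B (the rewrite author's own statement) =====
-- stated objective: alternative
-- what changed: Replaces split-into-parts plus pairwise zip comparison with a split-free synchronized two-pointer walk over the raw pattern and scope strings that consumes one ':'-delimited segment at a time ('*' skips a whole scope segment); the length check disappears, enforced by the walk reaching both string ends together.
import Mathlib
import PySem

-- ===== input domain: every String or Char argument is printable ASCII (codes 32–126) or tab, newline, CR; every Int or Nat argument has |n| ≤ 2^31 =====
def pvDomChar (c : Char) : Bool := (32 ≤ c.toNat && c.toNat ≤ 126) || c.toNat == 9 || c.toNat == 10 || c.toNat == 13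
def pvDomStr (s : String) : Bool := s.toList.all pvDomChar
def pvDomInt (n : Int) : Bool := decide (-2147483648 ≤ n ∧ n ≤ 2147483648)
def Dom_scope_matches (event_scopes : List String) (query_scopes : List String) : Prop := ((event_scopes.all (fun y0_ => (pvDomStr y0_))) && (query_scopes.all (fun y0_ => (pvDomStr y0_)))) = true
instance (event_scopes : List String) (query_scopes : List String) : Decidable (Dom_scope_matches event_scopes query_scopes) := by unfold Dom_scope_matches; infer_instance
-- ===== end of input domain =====

-- B replaces A's split-into-parts + zip comparison with a split-free synchronized
-- segment-at-a-time walk over the two raw strings (alternative structure, same result).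


-- ===== PORT A =====
-- s.split(":") — sep is the non-empty literal ":", so split? is always some
def pvSplit (s : String) : List String := (PySem.Str.split? s ":").getD []

-- for pat in query_scopes: for scope in event_scopes: early `return True` = List.any
def scope_matches (event_scopes : List String) (query_scopes : List String) : Bool :=
  query_scopes.any (fun pat =>
    let pat_parts := pvSplit pat
    event_scopes.any (fun scope =>
      let scope_parts := pvSplit scope
      -- `if len(...) != len(...): continue` then `if all(...): return True`
      (pat_parts.length == scope_parts.length) &&
        (pat_parts.zip scope_parts).all (fun q => q.1 == "*" || q.1 == q.2)))

-- ===== PORT B =====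
-- _drop_seg: `while s and s[0] != ':': s = s[1:]`
def dropSeg : List Char → List Char
  | [] => []
  | c :: t => if c ≠ ':' then dropSeg t else c :: t

-- _eat_common: `while p and s and p[0] != ':' and s[0] != ':' and p[0] == s[0]: ...`
def eatCommon : List Char → List Char → List Char × List Char
  | a :: p, b :: s => if a ≠ ':' ∧ b ≠ ':' ∧ a = b then eatCommon p s else (a :: p, b :: s)
  | p, s => (p, s)

-- `pat[:1] == '*' and (len(pat) == 1 or pat[1] == ':')`
def isStar : List Char → Bool
  | [] => false
  | c :: rest => c == '*' && (rest.isEmpty || rest.head? == some ':')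

-- termination helper for the walk: the literal-comparison phase never grows the pattern
theorem eatCommon_fst_length : ∀ (p s : List Char), (eatCommon p s).1.length ≤ p.length := by
  intro p
  induction p with
  | nil => intro s; cases s <;> simp [eatCommon]
  | cons a p ih =>
    intro s
    cases s with
    | nil => simp [eatCommon]
    | cons b s =>
      by_cases h : a ≠ ':' ∧ b ≠ ':' ∧ a = b
      · simp only [eatCommon, if_pos h]
        exact le_trans (ih s) (Nat.le_succ _)
      · simp [eatCommon, if_neg h]

-- _match: the while-True loop, one ':'-delimited segment consumed per iteration
def chMatch (pat scope : List Char) : Bool :=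
  match hq : (if isStar pat then (pat.drop 1, dropSeg scope) else eatCommon pat scope) with
  | (p1, s1) =>
    if p1 = [] ∧ s1 = [] then true
    else if _h2 : p1.head? = some ':' ∧ s1.head? = some ':' then chMatch p1.tail s1.tail
    else false
termination_by pat.length
decreasing_by
  have hne : p1 ≠ [] := by
    intro he; rw [he] at _h2; simp at _h2
  have hp1 : 1 ≤ p1.length := by
    cases p1 with
    | nil => exact absurd rfl hne
    | cons _ _ => simp
  split at hq
  · next hstar =>
    have h1 : pat.drop 1 = p1 := congrArg Prod.fst hq
    have h2 := congrArg List.length h1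
    simp at h2
    have h3 : p1.tail.length = p1.length - 1 := by simp
    omega
  · have h1 : (eatCommon pat scope).1 = p1 := congrArg Prod.fst hq
    have h2 := eatCommon_fst_length pat scope
    rw [h1] at h2
    have h3 : p1.tail.length = p1.length - 1 := by simp
    omega

-- any(_match(pat, scope) for pat in query_scopes for scope in event_scopes)
def scope_matches_alt (event_scopes : List String) (query_scopes : List String) : Bool :=
  query_scopes.any (fun pat => event_scopes.any (fun scope => chMatch pat.toList scope.toList))

-- ===== PRECONDITION & SPEC =====
def Spec_scope_matches (event_scopes : List String) (query_scopes : List String) (out : Bool) : Prop := out = scope_matches_alt event_scopes query_scopes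
instance (event_scopes : List String) (query_scopes : List String) (out : Bool) : Decidable (Spec_scope_matches event_scopes query_scopes out) := by unfold Spec_scope_matches; infer_instance

-- ===== CLAIM (what is proved, stated in full; the proofs are below) =====
def Claim_equal_scope_matches : Prop := ∀ (event_scopes : List String) (query_scopes : List String), Dom_scope_matches event_scopes query_scopes → Spec_scope_matches event_scopes query_scopes (scope_matches event_scopes query_scopes)

-- ===== LEMMAS AND PROOFS =====

-- split on ':' as a plain structural recursion (proof-side model of str.split(":"))
def mySplit : List Char → List (List Char)
  | [] => [[]]
  | c :: t =>
    if c = ':' then [] :: mySplit t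
    else
      match mySplit t with
      | [] => [[c]]
      | h :: r => (c :: h) :: r

def takeSeg (s : List Char) : List Char := s.takeWhile (· ≠ ':')

-- pairwise part matching (the recursive form of A's length-check + zip-all)
def pMatch : List (List Char) → List (List Char) → Bool
  | [], [] => true
  | a :: as, b :: bs => (a == ['*'] || a == b) && pMatch as bs
  | [], _ :: _ => false
  | _ :: _, [] => false

-- the tail of _match's loop body, after one segment has been consumed
def cont (step : List Char → List Char → Bool) (p1 s1 : List Char) : Bool :=
  if p1 = [] ∧ s1 = [] then true
  else if _h2 : p1.head? = some ':' ∧ s1.head? = some ':' then step p1.tail s1.tail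
  else false

theorem mySplit_ne_nil (s : List Char) : mySplit s ≠ [] := by
  cases s with
  | nil => simp [mySplit]
  | cons c t =>
    simp only [mySplit]
    split
    · simp
    · split <;> simp

theorem mySplit_decomp (s : List Char) :
    (dropSeg s = [] ∧ mySplit s = [takeSeg s]) ∨
    (∃ t, dropSeg s = ':' :: t ∧ mySplit s = takeSeg s :: mySplit t) := by
  induction s with
  | nil => left; simp [dropSeg, mySplit, takeSeg]
  | cons c t ih =>
    by_cases hc : c = ':'
    · right
      exact ⟨t, by simp [dropSeg, hc], by simp [mySplit, hc, takeSeg]⟩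
    · have htake : takeSeg (c :: t) = c :: takeSeg t := by
        simp [takeSeg, hc]
      have hdrop : dropSeg (c :: t) = dropSeg t := by simp [dropSeg, hc]
      rcases ih with ⟨h1, h2⟩ | ⟨u, h1, h2⟩
      · left
        refine ⟨by rw [hdrop]; exact h1, ?_⟩
        simp only [mySplit, if_neg hc, h2, htake]
      · right
        refine ⟨u, by rw [hdrop]; exact h1, ?_⟩
        simp only [mySplit, if_neg hc, h2, htake]

theorem dropSeg_length (s : List Char) : (dropSeg s).length ≤ s.length := by
  induction s with
  | nil => simp [dropSeg]
  | cons c t ih =>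
    simp only [dropSeg]
    split
    · exact le_trans ih (Nat.le_succ _)
    · simp

theorem isStar_iff (p : List Char) : isStar p = true ↔ takeSeg p = ['*'] := by
  cases p with
  | nil => simp [isStar, takeSeg]
  | cons c rest =>
    by_cases hc : c = ':'
    · subst hc; simp [isStar, takeSeg]
    · cases rest with
      | nil => simp [isStar, takeSeg, hc]
      | cons d u =>
        by_cases hd : d = ':'
        · subst hd; simp [isStar, takeSeg, hc]
        · simp [isStar, takeSeg, hc, hd]

theorem isStar_shape (p : List Char) (h : isStar p = true) : ∃ rest, p = '*' :: rest := by
  cases p with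
  | nil => simp [isStar] at h
  | cons c rest =>
    refine ⟨rest, ?_⟩
    simp only [isStar, Bool.and_eq_true, beq_iff_eq] at h
    rw [h.1]

theorem eatCommon_cons_eq {a b : Char} (p s : List Char) (ha : a ≠ ':') (hb : b ≠ ':') (hab : a = b) :
    eatCommon (a :: p) (b :: s) = eatCommon p s := by
  simp [eatCommon, hb, hab]

-- unfold the loop body once, through `cont`
theorem chMatch_eq (p s : List Char) :
    chMatch p s = if isStar p then cont chMatch (p.drop 1) (dropSeg s)
                  else cont chMatch (eatCommon p s).1 (eatCommon p s).2 := by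
  rw [chMatch.eq_def]
  by_cases h : isStar p <;> simp [h, cont]

-- the literal-comparison phase agrees segment-wise
theorem eat_spec (step : List Char → List Char → Bool) : ∀ (p s : List Char),
    cont step (eatCommon p s).1 (eatCommon p s).2
      = ((takeSeg p == takeSeg s) && cont step (dropSeg p) (dropSeg s)) := by
  intro p
  induction p with
  | nil =>
    intro s
    cases s with
    | nil => simp [eatCommon, cont, takeSeg, dropSeg]
    | cons b s' =>
      by_cases hb : b = ':'
      · subst hb; simp [eatCommon, cont, takeSeg, dropSeg]
      · simp [eatCommon, cont, takeSeg, dropSeg, hb]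
  | cons a p' ih =>
    intro s
    cases s with
    | nil =>
      by_cases ha : a = ':'
      · subst ha; simp [eatCommon, cont, takeSeg, dropSeg]
      · simp [eatCommon, cont, takeSeg, dropSeg, ha]
    | cons b s' =>
      by_cases h : a ≠ ':' ∧ b ≠ ':' ∧ a = b
      · obtain ⟨ha, hb, hab⟩ := h
        rw [eatCommon_cons_eq p' s' ha hb hab, ih s']
        subst hab
        simp [takeSeg, dropSeg, ha]
      · by_cases ha : a = ':'
        · subst ha
          by_cases hb : b = ':'
          · subst hb; simp [eatCommon, cont, takeSeg, dropSeg]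
          · simp [eatCommon, cont, takeSeg, dropSeg, hb]
        · have hab : a ≠ b := fun he => h ⟨ha, fun hb => (by rw [he] at ha; exact ha hb), he⟩
          by_cases hb : b = ':'
          · subst hb
            simp [eatCommon, cont, takeSeg, dropSeg, ha]
          · simp [eatCommon, cont, takeSeg, dropSeg, ha, hb, hab]

theorem takeSeg_cons {c : Char} (t : List Char) (hc : c ≠ ':') : takeSeg (c :: t) = c :: takeSeg t := by
  simp [takeSeg, hc]

-- MAIN: the streaming walk computes pairwise matching of the ':'-split parts
theorem chMatch_eq_pMatch : ∀ (p s : List Char), chMatch p s = pMatch (mySplit p) (mySplit s) := by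
  have key : ∀ (n : Nat) (p s : List Char), p.length < n → chMatch p s = pMatch (mySplit p) (mySplit s) := by
    intro n
    induction n with
    | zero => intro p s h; omega
    | succ n ih =>
      intro p s hlt
      rw [chMatch_eq]
      by_cases hstar : isStar p
      · rw [if_pos hstar]
        obtain ⟨rest, hp⟩ := isStar_shape p hstar
        have htake : takeSeg p = ['*'] := (isStar_iff p).1 hstar
        subst hp
        have hstarcolon : ('*' : Char) ≠ ':' := by decide
        have htrest : takeSeg rest = [] := by
          rw [takeSeg_cons rest hstarcolon] at htake
          exact (List.cons.injEq .. ▸ htake).2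
        have hdropp : dropSeg ('*' :: rest) = dropSeg rest := by simp [dropSeg]
        cases rest with
        | nil =>
          -- pattern is exactly "*…" with empty tail: p = ['*'], mySplit p = [['*']]
          have hmp : mySplit ['*'] = [['*']] := by decide
          rw [hmp]
          simp only [List.drop_succ_cons, List.drop_zero]
          rcases mySplit_decomp s with ⟨hd2, hs2⟩ | ⟨u, hd2, hs2⟩
          · rw [hd2, hs2]; simp [cont, pMatch]
          · rw [hd2, hs2]
            have := mySplit_ne_nil u
            obtain ⟨x, xs, hx⟩ := List.exists_cons_of_ne_nil this
            rw [hx]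
            simp [cont, pMatch]
        | cons d u =>
          have hd : d = ':' := by
            by_cases hd' : d = ':'
            · exact hd'
            · rw [takeSeg_cons u hd'] at htrest; simp at htrest
          subst hd
          have hmp : mySplit ('*' :: ':' :: u) = ['*'] :: mySplit u := by
            rcases mySplit_decomp ('*' :: ':' :: u) with ⟨h1, _⟩ | ⟨t, h1, h2⟩
            · rw [hdropp] at h1; simp [dropSeg] at h1
            · rw [hdropp] at h1
              simp only [dropSeg] at h1
              simp at h1
              rw [h2, htake, h1]
          rw [hmp]
          simp only [List.drop_succ_cons, List.drop_zero]
          rcases mySplit_decomp s with ⟨hd2, hs2⟩ | ⟨v, hd2, hs2⟩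
          · rw [hd2, hs2]
            have := mySplit_ne_nil u
            obtain ⟨x, xs, hx⟩ := List.exists_cons_of_ne_nil this
            rw [hx]
            simp [cont, pMatch]
          · rw [hd2, hs2]
            have hrec : chMatch u v = pMatch (mySplit u) (mySplit v) := by
              apply ih
              simp at hlt
              omega
            simp [cont, pMatch, hrec]
      · rw [if_neg hstar, eat_spec chMatch p s]
        have htake' : takeSeg p ≠ ['*'] := fun he => hstar ((isStar_iff p).2 he)
        have hbeq : (takeSeg p == ['*']) = false := by
          simp [htake']
        rcases mySplit_decomp p with ⟨hdp, hsp⟩ | ⟨t, hdp, hsp⟩ <;>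
          rcases mySplit_decomp s with ⟨hds, hss⟩ | ⟨u, hds, hss⟩
        · rw [hdp, hds, hsp, hss]; simp [cont, pMatch, hbeq]
        · rw [hdp, hds, hsp, hss]
          obtain ⟨x, xs, hx⟩ := List.exists_cons_of_ne_nil (mySplit_ne_nil u)
          rw [hx]
          simp [cont, pMatch, hbeq]
        · rw [hdp, hds, hsp, hss]
          obtain ⟨x, xs, hx⟩ := List.exists_cons_of_ne_nil (mySplit_ne_nil t)
          rw [hx]
          simp [cont, pMatch, hbeq]
        · rw [hdp, hds, hsp, hss]
          have hrec : chMatch t u = pMatch (mySplit t) (mySplit u) := by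
            apply ih
            have := dropSeg_length p
            rw [hdp] at this
            simp at this
            omega
          simp [cont, pMatch, hbeq, hrec]
  intro p s
  exact key (p.length + 1) p s (Nat.lt_succ_self _)

-- bridge: PySem's fueled split on ":" is mySplit
def prep (x : List Char) : List (List Char) → List (List Char)
  | [] => [x]
  | h :: t => (x ++ h) :: t

theorem go_spec : ∀ (fuel : Nat) (l cur : List Char) (acc : List (List Char)),
    l.length ≤ fuel →
    PySem.Chars.splitOn.go [':'] fuel l cur acc
      = acc.reverse ++ prep cur.reverse (mySplit l) := by
  intro fuel
  induction fuel with
  | zero =>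
    intro l cur acc h
    have hl : l = [] := List.eq_nil_of_length_eq_zero (Nat.le_zero.1 h)
    subst hl
    simp [PySem.Chars.splitOn.go, mySplit, prep]
  | succ fuel ih =>
    intro l cur acc h
    cases l with
    | nil => simp [PySem.Chars.splitOn.go, mySplit, prep]
    | cons c rest =>
      by_cases hc : c = ':'
      · subst hc
        have hpre : [':'].isPrefixOf (':' :: rest) = true := by simp [List.isPrefixOf]
        rw [PySem.Chars.splitOn.go, if_pos hpre]
        simp only [List.length_singleton, List.drop_succ_cons, List.drop_zero]
        rw [ih rest [] (cur.reverse :: acc) (by simp at h; omega)]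
        obtain ⟨x, xs, hx⟩ := List.exists_cons_of_ne_nil (mySplit_ne_nil rest)
        simp [mySplit, prep, hx]
      · have hpre : [':'].isPrefixOf (c :: rest) = false := by
          simp [List.isPrefixOf]
          exact fun he => hc he.symm
        rw [PySem.Chars.splitOn.go, if_neg (by simp [hpre])]
        rw [ih rest (c :: cur) acc (by simp at h; omega)]
        obtain ⟨x, xs, hx⟩ := List.exists_cons_of_ne_nil (mySplit_ne_nil rest)
        simp [mySplit, prep, hx, hc]

theorem splitOn_eq (l : List Char) : PySem.Chars.splitOn l [':'] = mySplit l := by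
  rw [PySem.Chars.splitOn, go_spec (l.length + 1) l [] [] (Nat.le_succ _)]
  obtain ⟨x, xs, hx⟩ := List.exists_cons_of_ne_nil (mySplit_ne_nil l)
  simp [prep, hx]

-- A's split, through PySem, is mySplit on the char list
theorem pvSplit_eq (s : String) : pvSplit s = (mySplit s.toList).map String.ofList := by
  have h : (":" : String).toList = [':'] := by decide
  rw [pvSplit, PySem.Str.split?, h, PySem.Chars.split?]
  simp [splitOn_eq]

theorem ofList_beq (a b : List Char) : (String.ofList a == String.ofList b) = (a == b) := by
  rw [Bool.eq_iff_iff]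
  simp only [beq_iff_eq]
  constructor
  · intro h
    simpa using congrArg String.toList h
  · intro h
    rw [h]

theorem ofList_beq_star (a : List Char) : (String.ofList a == "*") = (a == ['*']) := by
  have h : ("*" : String) = String.ofList ['*'] := by decide
  rw [h, ofList_beq]

theorem succ_beq (x y : Nat) : (x + 1 == y + 1) = (x == y) := by
  rw [Bool.eq_iff_iff]
  simp

-- A's length-check + zip-all over the mapped strings is pMatch on the char lists
theorem lenzip_eq_pMatch : ∀ (P S : List (List Char)),
    (((P.map String.ofList).length == (S.map String.ofList).length) &&
      ((P.map String.ofList).zip (S.map String.ofList)).all (fun q => q.1 == "*" || q.1 == q.2))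
    = pMatch P S := by
  intro P
  induction P with
  | nil =>
    intro S
    cases S with
    | nil => simp [pMatch]
    | cons b S' => simp [pMatch]
  | cons a P' ih =>
    intro S
    cases S with
    | nil => simp [pMatch]
    | cons b S' =>
      simp only [List.map_cons, List.length_cons, List.zip_cons_cons, List.all_cons, pMatch]
      rw [← ih S']
      rw [succ_beq, ofList_beq_star, ofList_beq]
      rw [Bool.and_left_comm]

-- ===== VERDICT (by name: the statement is the Claim_ definition above) =====
theorem scope_matches_spec : Claim_equal_scope_matches := by
  intro es qs _
  show scope_matches es qs = scope_matches_alt es qs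
  dsimp only [scope_matches, scope_matches_alt]
  refine List.any_congr rfl (fun pat => ?_)
  refine List.any_congr rfl (fun scope => ?_)
  rw [pvSplit_eq, pvSplit_eq, lenzip_eq_pMatch, chMatch_eq_pMatch]
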